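-- pv_equiv track=rewrite | github.com/RobinSiep/advent | day14/solution.py | execute_insertions
-- ===== SOURCE A (Python) =====
-- def execute_insertions(
--     polymer_template: str,
--     insertion_rules: dict[str, str],
--     steps: int,
-- ) -> str:
--     polymer = polymer_template
--     for _ in range(steps):
--         polymer = insert(polymer, insertion_rules)
--
--     return polymer
--
-- def insert(polymer: str, insertion_rules: dict[str, str]) -> str:
--     new_polymer = list(polymer)
--     i = 0
--     while True:
--         try:
--             pair = new_polymer[i] + new_polymer[i + 1]
--             new_element = insertion_rules[pair]
--         except KeyError:
--             i += 1
--             continue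
--         except IndexError:
--             break
--
--         new_polymer.insert(i + 1, new_element)
--         i += 2
--
--     return "".join(new_polymer)
-- ===== SOURCE B (Python) =====
-- def execute_insertions(
--     polymer_template: str,
--     insertion_rules: dict[str, str],
--     steps: int,
-- ) -> str:
--     if len(polymer_template) < 2 or steps <= 0:
--         return polymer_template
--     # level-0 table: every 2-char rule key expands to itself
--     table = {k: k for k in insertion_rules if len(k) == 2}
--     for _ in range(steps):
--         table = {k: _stitch(k[0] + insertion_rules[k] + k[1], table)
--                  for k in table}
--     return _stitch(polymer_template, table)
--
--
-- def _stitch(s: str, table: dict[str, str]) -> str: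
--     parts = [s[0]]
--     for i in range(len(s) - 1):
--         pair = s[i:i + 2]
--         parts.append(table.get(pair, pair)[1:])
--     return "".join(parts)
-- ===== Notes on version B (the rewrite author's own statement) =====
-- stated objective: faster
-- what changed: B replaces A's per-step in-place scan-and-insert over the whole growing polymer by a bottom-up memo table mapping each 2-char rule key to its fully expanded string after n steps, built level by level, with the final answer stitched once from the template's adjacent pairs (overlap character dropped).
import Mathlib
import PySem

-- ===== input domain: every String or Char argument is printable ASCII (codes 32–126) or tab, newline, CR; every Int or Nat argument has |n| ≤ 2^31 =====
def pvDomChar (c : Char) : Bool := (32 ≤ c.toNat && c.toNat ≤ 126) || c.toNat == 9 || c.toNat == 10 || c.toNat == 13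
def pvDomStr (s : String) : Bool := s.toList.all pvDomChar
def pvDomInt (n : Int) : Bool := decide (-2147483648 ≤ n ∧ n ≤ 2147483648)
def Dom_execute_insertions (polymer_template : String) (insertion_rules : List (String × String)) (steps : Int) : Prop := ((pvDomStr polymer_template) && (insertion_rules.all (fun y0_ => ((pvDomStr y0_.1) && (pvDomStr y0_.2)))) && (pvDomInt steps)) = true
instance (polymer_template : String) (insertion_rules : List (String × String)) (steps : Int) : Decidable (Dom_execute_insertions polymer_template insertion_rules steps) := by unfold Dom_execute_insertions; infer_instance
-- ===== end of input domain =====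

-- B replaces A's per-step in-place list rewriting by a bottom-up memo table of fully-expanded
-- pair strings stitched together once at the end (objective: faster; a timing run measured it).

-- shared primitive: Python's dict lookup on the association list (first match), on the char-list view
def pvLookup (d : List (String × String)) (k : List Char) : Option (List Char) :=
  match d with
  | [] => none
  | (a, b) :: rest => if a.toList = k then some b.toList else pvLookup rest k

-- ===== PORT A =====
-- A's `while True` loop in `insert`: new_polymer is a list of string fragments (char lists)
def pvAloop (rules : List (String × String)) (np : List (List Char)) (i : Nat) : List (List Char) :=
  match h1 : np[i]?, h2 : np[i+1]? with
  | some a, some b =>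
    match pvLookup rules (a ++ b) with
    | some c => pvAloop rules (PySem.List.insert np ((i : Int) + 1) c) (i + 2)
    | none => pvAloop rules np (i + 1)
  | _, _ => np
termination_by np.length - i
decreasing_by
  · obtain ⟨hlt, -⟩ := List.getElem?_eq_some_iff.mp h2
    rw [PySem.List.length_insert]
    omega
  · obtain ⟨hlt, -⟩ := List.getElem?_eq_some_iff.mp h2
    omega

-- A's `insert` helper: list(polymer), the loop, then "".join
def pvAinsert (rules : List (String × String)) (polymer : List Char) : List Char :=
  (pvAloop rules (polymer.map (fun c => [c])) 0).flatten

def execute_insertions (polymer_template : String) (insertion_rules : List (String × String)) (steps : Int) : String :=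
  String.ofList
    ((PySem.List.pyRange 0 steps 1).foldl (fun p _ => pvAinsert insertion_rules p) polymer_template.toList)

-- ===== PORT B =====
-- B's _stitch: seed with s[0], then for each adjacent pair append its (table-expanded) tail
def pvBstitchAux (tbl : List (String × String)) (prev : Char) : List Char → List Char
  | [] => []
  | b :: rest => ((pvLookup tbl [prev, b]).getD [prev, b]).tail ++ pvBstitchAux tbl b rest

def pvBstitch (tbl : List (String × String)) (s : List Char) : List Char :=
  match s with
  | [] => []
  | c :: rest => c :: pvBstitchAux tbl c rest

-- B's level-0 table: every 2-char rule key expands to itself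
def pvBinit (rules : List (String × String)) : List (String × String) :=
  (rules.filter (fun kv => kv.1.toList.length == 2)).map (fun kv => (kv.1, kv.1))

-- B's next-level table: expand each pair once by its rule, then stitch with the previous level
def pvBlevel (rules tbl : List (String × String)) : List (String × String) :=
  tbl.map (fun kv =>
    (kv.1, String.ofList (pvBstitch tbl
      (kv.1.toList.take 1 ++ (pvLookup rules kv.1.toList).getD [] ++ kv.1.toList.drop 1))))

def execute_insertions_alt (polymer_template : String) (insertion_rules : List (String × String)) (steps : Int) : String :=
  if polymer_template.toList.length < 2 ∨ steps ≤ 0 then polymer_template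
  else
    String.ofList (pvBstitch
      ((PySem.List.pyRange 0 steps 1).foldl (fun tb _ => pvBlevel insertion_rules tb) (pvBinit insertion_rules))
      polymer_template.toList)

-- ===== PRECONDITION & SPEC =====
def Spec_execute_insertions (polymer_template : String) (insertion_rules : List (String × String)) (steps : Int) (out : String) : Prop := out = execute_insertions_alt polymer_template insertion_rules steps
instance (polymer_template : String) (insertion_rules : List (String × String)) (steps : Int) (out : String) : Decidable (Spec_execute_insertions polymer_template insertion_rules steps out) := by unfold Spec_execute_insertions; infer_instance

-- ===== CLAIM (what is proved, stated in full; the proofs are below) =====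
def Claim_equal_execute_insertions : Prop := ∀ (polymer_template : String) (insertion_rules : List (String × String)) (steps : Int), Dom_execute_insertions polymer_template insertion_rules steps → Spec_execute_insertions polymer_template insertion_rules steps (execute_insertions polymer_template insertion_rules steps)

-- ===== LEMMAS AND PROOFS =====

-- the mathematical one-step expansion on characters ("A's insert, seen through join")
def pvStep (rules : List (String × String)) : List Char → List Char
  | [] => []
  | [a] => [a]
  | a :: b :: rest => a :: ((pvLookup rules [a, b]).getD [] ++ pvStep rules (b :: rest))

-- A's loop, re-expressed structurally over the fragment list
def pvProc (rules : List (String × String)) : List (List Char) → List (List Char)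
  | [] => []
  | [a] => [a]
  | a :: b :: rest =>
    match pvLookup rules (a ++ b) with
    | some c => a :: c :: pvProc rules (b :: rest)
    | none => a :: pvProc rules (b :: rest)

theorem pvAloop_eq (rules : List (String × String)) (np : List (List Char)) (i : Nat) :
    pvAloop rules np i = np.take i ++ pvProc rules (np.drop i) := by
  fun_induction pvAloop rules np i with
  | case1 np i a b h1 h2 c hc ih =>
    obtain ⟨hi1, hb⟩ := List.getElem?_eq_some_iff.mp h2
    obtain ⟨hi0, ha⟩ := List.getElem?_eq_some_iff.mp h1
    have hins : PySem.List.insert np ((i : Int) + 1) c = np.take (i+1) ++ c :: np.drop (i+1) := by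
      have h := PySem.List.insert_natCast np (i+1) c (by omega)
      rw [show (((i+1 : Nat) : Int)) = (i : Int) + 1 by push_cast; ring] at h
      exact h
    rw [ih, hins]
    have hlt : (np.take (i+1)).length = i + 1 := by rw [List.length_take]; omega
    have htake : (np.take (i+1) ++ c :: np.drop (i+1)).take (i+2) = np.take (i+1) ++ [c] := by
      rw [show i + 2 = (np.take (i+1)).length + 1 by rw [hlt], List.take_append]
      simp
    have hdrop : (np.take (i+1) ++ c :: np.drop (i+1)).drop (i+2) = np.drop (i+1) := by
      rw [show i + 2 = (np.take (i+1)).length + 1 by rw [hlt], List.drop_append]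
      simp
    rw [htake, hdrop]
    have hd1 : np.drop i = a :: np.drop (i+1) := by
      rw [List.drop_eq_getElem_cons hi0, ha]
    have hd2 : np.drop (i+1) = b :: np.drop (i+2) := by
      rw [List.drop_eq_getElem_cons hi1, hb]
    have ht1 : np.take (i+1) = np.take i ++ [a] := by rw [List.take_succ, h1]; rfl
    rw [ht1, hd1, hd2]
    simp [pvProc, hc]
  | case2 np i a b h1 h2 hc ih =>
    obtain ⟨hi1, hb⟩ := List.getElem?_eq_some_iff.mp h2
    obtain ⟨hi0, ha⟩ := List.getElem?_eq_some_iff.mp h1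
    rw [ih]
    have hd1 : np.drop i = a :: np.drop (i+1) := by
      rw [List.drop_eq_getElem_cons hi0, ha]
    have hd2 : np.drop (i+1) = b :: np.drop (i+2) := by
      rw [List.drop_eq_getElem_cons hi1, hb]
    have ht1 : np.take (i+1) = np.take i ++ [a] := by rw [List.take_succ, h1]; rfl
    rw [ht1, hd1, hd2]
    simp [pvProc, hc]
  | case3 np i h =>
    cases h1 : np[i]? with
    | none =>
      have hi : np.length ≤ i := List.getElem?_eq_none_iff.mp h1
      rw [List.drop_eq_nil_of_le hi, List.take_of_length_le hi]
      simp [pvProc]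
    | some a =>
      cases h2 : np[i+1]? with
      | some b => exact (h a b h1 h2).elim
      | none =>
        have hi1 : np.length ≤ i + 1 := List.getElem?_eq_none_iff.mp h2
        obtain ⟨hi0, ha⟩ := List.getElem?_eq_some_iff.mp h1
        have hd1 : np.drop i = [a] := by
          rw [List.drop_eq_getElem_cons hi0, ha, List.drop_eq_nil_of_le hi1]
        rw [hd1]
        show np = np.take i ++ [a]
        conv_lhs => rw [← List.take_append_drop i np]
        rw [hd1]

theorem flatten_pvProc (rules : List (String × String)) (s : List Char) :
    (pvProc rules (s.map (fun c => [c]))).flatten = pvStep rules s := by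
  induction s with
  | nil => rfl
  | cons a t ih =>
    cases t with
    | nil => rfl
    | cons b t' =>
      simp only [List.map, pvProc, pvStep]
      cases hc : pvLookup rules ([a] ++ [b]) with
      | none => simp_all
      | some c => simp_all

theorem pvAinsert_eq (rules : List (String × String)) (s : List Char) :
    pvAinsert rules s = pvStep rules s := by
  unfold pvAinsert
  rw [pvAloop_eq]
  simpa using flatten_pvProc rules s

theorem pvStep_cons (rules : List (String × String)) (a : Char) (t : List Char) :
    pvStep rules (a :: t) = a :: (pvStep rules (a :: t)).tail := by
  cases t <;> simp [pvStep]

theorem pvStep_head? (rules : List (String × String)) (s : List Char) :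
    (pvStep rules s).head? = s.head? := by
  cases s with
  | nil => rfl
  | cons a t => rw [pvStep_cons]; rfl

theorem pvStep_ne_nil (rules : List (String × String)) (s : List Char) (h : s ≠ []) :
    pvStep rules s ≠ [] := by
  cases s with
  | nil => exact absurd rfl h
  | cons a t => rw [pvStep_cons]; simp

theorem pvStep_getLast? (rules : List (String × String)) (s : List Char) :
    (pvStep rules s).getLast? = s.getLast? := by
  induction s with
  | nil => rfl
  | cons a t ih =>
    cases t with
    | nil => rfl
    | cons b t' =>
      have hne : pvStep rules (b :: t') ≠ [] := pvStep_ne_nil rules _ (by simp)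
      simp only [pvStep, List.getLast?_cons_cons]
      rw [← List.cons_append, List.getLast?_append_of_ne_nil _ hne, ih]

theorem pvStep_overlap (rules : List (String × String)) :
    ∀ u v : List Char, u ≠ [] → v ≠ [] → u.getLast? = v.head? →
      pvStep rules (u ++ v.tail) = pvStep rules u ++ (pvStep rules v).tail := by
  intro u
  induction u with
  | nil => intro v h; exact absurd rfl h
  | cons a u' ih =>
    intro v _ hv hlast
    cases u' with
    | nil =>
      cases v with
      | nil => exact absurd rfl hv
      | cons x vt =>
        simp at hlast
        subst hlast
        rw [show [a] ++ (a :: vt).tail = a :: vt by rfl]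
        conv_lhs => rw [pvStep_cons]
        simp [pvStep]
    | cons c u'' =>
      have ih' := ih v (by simp) hv (by simpa using hlast)
      simp only [List.cons_append] at ih'
      simp only [List.cons_append, pvStep]
      rw [ih']
      simp

theorem pvStep_iter_cons (rules : List (String × String)) (n : Nat) :
    ∀ (a : Char) (t : List Char),
      (pvStep rules)^[n] (a :: t) = a :: ((pvStep rules)^[n] (a :: t)).tail := by
  induction n with
  | zero => intro a t; rfl
  | succ m ih =>
    intro a t
    rw [Function.iterate_succ_apply, pvStep_cons]
    exact ih a _

theorem pvStep_iter_nil (rules : List (String × String)) (n : Nat) :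
    (pvStep rules)^[n] [] = [] := by
  induction n with
  | zero => rfl
  | succ m ih => rw [Function.iterate_succ_apply]; exact ih

theorem pvStep_iter_singleton (rules : List (String × String)) (n : Nat) (a : Char) :
    (pvStep rules)^[n] [a] = [a] := by
  induction n with
  | zero => rfl
  | succ m ih => rw [Function.iterate_succ_apply]; exact ih

theorem pvStep_iter_overlap (rules : List (String × String)) (n : Nat) :
    ∀ u v : List Char, u ≠ [] → v ≠ [] → u.getLast? = v.head? →
      (pvStep rules)^[n] (u ++ v.tail) = (pvStep rules)^[n] u ++ ((pvStep rules)^[n] v).tail := by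
  induction n with
  | zero => intro u v _ _ _; rfl
  | succ m ih =>
    intro u v hu hv h
    rw [Function.iterate_succ_apply, Function.iterate_succ_apply, Function.iterate_succ_apply,
      pvStep_overlap rules u v hu hv h]
    exact ih (pvStep rules u) (pvStep rules v) (pvStep_ne_nil rules u hu) (pvStep_ne_nil rules v hv)
      (by rw [pvStep_getLast?, pvStep_head?]; exact h)

theorem pvStep_iter_pair (rules : List (String × String)) (n : Nat) (a b : Char) (t : List Char) :
    (pvStep rules)^[n] (a :: b :: t) = (pvStep rules)^[n] [a, b] ++ ((pvStep rules)^[n] (b :: t)).tail := by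
  have := pvStep_iter_overlap rules n [a, b] (b :: t) (by simp) (by simp) (by simp)
  simpa using this

-- the table invariant after n levels
def pvInv (rules tbl : List (String × String)) (n : Nat) : Prop :=
  ∀ x y : Char,
    ((pvLookup tbl [x, y]).getD [x, y] = (pvStep rules)^[n] [x, y]) ∧
    (pvLookup tbl [x, y] = none → pvLookup rules [x, y] = none)

theorem pvBstitchAux_eq (rules tbl : List (String × String)) (n : Nat) (h : pvInv rules tbl n) :
    ∀ (t : List Char) (a : Char), a :: pvBstitchAux tbl a t = (pvStep rules)^[n] (a :: t) := by
  intro t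
  induction t with
  | nil => intro a; rw [pvStep_iter_singleton]; rfl
  | cons b t' ih =>
    intro a
    rw [pvStep_iter_pair, ← ih b]
    simp only [pvBstitchAux, (h a b).1, List.tail_cons]
    conv_rhs => rw [pvStep_iter_cons rules n a [b]]
    simp

theorem pvBstitch_eq (rules tbl : List (String × String)) (n : Nat) (h : pvInv rules tbl n)
    (s : List Char) : pvBstitch tbl s = (pvStep rules)^[n] s := by
  cases s with
  | nil => rw [pvStep_iter_nil]; rfl
  | cons a t => exact pvBstitchAux_eq rules tbl n h t a

theorem pvLookup_cons_eq (a v : String) (rest : List (String × String)) (k : List Char)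
    (h : a.toList = k) : pvLookup ((a, v) :: rest) k = some v.toList := by
  simp [pvLookup, h]

theorem pvLookup_cons_ne (a v : String) (rest : List (String × String)) (k : List Char)
    (h : a.toList ≠ k) : pvLookup ((a, v) :: rest) k = pvLookup rest k := by
  simp [pvLookup, h]

theorem pvLookup_init (rules : List (String × String)) (k : List Char) (hk : k.length = 2) :
    pvLookup (pvBinit rules) k = (pvLookup rules k).map (fun _ => k) := by
  induction rules with
  | nil => rfl
  | cons p rest ih =>
    obtain ⟨a, b⟩ := p
    unfold pvBinit at ih ⊢
    rw [List.filter_cons]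
    by_cases hak : a.toList = k
    · have ha2 : a.toList.length = 2 := by rw [hak]; exact hk
      rw [if_pos (show (a.toList.length == 2) = true by rw [ha2]; rfl)]
      rw [List.map_cons, pvLookup_cons_eq _ _ _ _ hak, pvLookup_cons_eq _ _ _ _ hak, hak]
      rfl
    · by_cases hl2 : a.toList.length = 2
      · rw [if_pos (show (a.toList.length == 2) = true by rw [hl2]; rfl)]
        rw [List.map_cons, pvLookup_cons_ne _ _ _ _ hak, pvLookup_cons_ne _ _ _ _ hak]
        exact ih
      · rw [if_neg (show ¬ (a.toList.length == 2) = true by simpa using hl2)]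
        rw [pvLookup_cons_ne _ _ _ _ hak]
        exact ih

theorem pvLookup_map_keyed (F : List Char → List Char) (k : List Char) :
    ∀ l : List (String × String),
      pvLookup (l.map (fun kv => (kv.1, String.ofList (F kv.1.toList)))) k =
        (pvLookup l k).map (fun _ => F k) := by
  intro l
  induction l with
  | nil => rfl
  | cons p rest ih =>
    obtain ⟨a, b⟩ := p
    by_cases hak : a.toList = k
    · simp [pvLookup, hak]
    · simp [pvLookup, hak, ih]

theorem pvLookup_level (rules tbl : List (String × String)) (k : List Char) :
    pvLookup (pvBlevel rules tbl) k =
      (pvLookup tbl k).map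
        (fun _ => pvBstitch tbl (k.take 1 ++ (pvLookup rules k).getD [] ++ k.drop 1)) := by
  exact pvLookup_map_keyed
    (fun kl => pvBstitch tbl (kl.take 1 ++ (pvLookup rules kl).getD [] ++ kl.drop 1)) k tbl

theorem pvStep_pair_unruled (rules : List (String × String)) (x y : Char)
    (h : pvLookup rules [x, y] = none) : pvStep rules [x, y] = [x, y] := by
  simp [pvStep, h]

theorem pvInv_init (rules : List (String × String)) : pvInv rules (pvBinit rules) 0 := by
  intro x y
  rw [pvLookup_init rules [x, y] rfl]
  cases hc : pvLookup rules [x, y] <;> simp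

theorem pvInv_level (rules tbl : List (String × String)) (n : Nat) (h : pvInv rules tbl n) :
    pvInv rules (pvBlevel rules tbl) (n + 1) := by
  intro x y
  rw [pvLookup_level rules tbl [x, y]]
  cases hc : pvLookup tbl [x, y] with
  | none =>
    have hr : pvLookup rules [x, y] = none := (h x y).2 hc
    refine ⟨?_, fun _ => hr⟩
    have h0 := (h x y).1
    rw [hc] at h0
    simp only [Option.getD_none] at h0
    rw [Function.iterate_succ_apply, pvStep_pair_unruled rules x y hr, ← h0]
    simp
  | some v =>
    refine ⟨?_, ?_⟩
    · simp only [Option.map_some, Option.getD_some]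
      rw [pvBstitch_eq rules tbl n h, Function.iterate_succ_apply]
      congr 1
    · intro hmap
      simp at hmap

theorem pvInv_iter (rules : List (String × String)) (n : Nat) :
    pvInv rules ((pvBlevel rules)^[n] (pvBinit rules)) n := by
  induction n with
  | zero => exact pvInv_init rules
  | succ m ih =>
    rw [Function.iterate_succ_apply']
    exact pvInv_level rules _ m ih

theorem pvFoldlConstIterate {α β : Type} (f : α → α) (l : List β) (x : α) :
    l.foldl (fun p _ => f p) x = f^[l.length] x := by
  induction l generalizing x with
  | nil => rfl
  | cons a t ih => rw [List.foldl_cons, List.length_cons, ih, ← Function.iterate_succ_apply]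

-- ===== VERDICT (by name: the statement is the Claim_ definition above) =====
theorem execute_insertions_spec : Claim_equal_execute_insertions := by
  intro t rules steps _
  unfold Spec_execute_insertions execute_insertions execute_insertions_alt
  have hlen : (PySem.List.pyRange 0 steps 1).length = steps.toNat := by
    rw [PySem.List.length_pyRange_one]; omega
  have hA : (PySem.List.pyRange 0 steps 1).foldl (fun p _ => pvAinsert rules p) t.toList =
      (pvStep rules)^[steps.toNat] t.toList := by
    rw [pvFoldlConstIterate (pvAinsert rules), hlen]
    have hfe : pvAinsert rules = pvStep rules := funext (pvAinsert_eq rules)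
    rw [hfe]
  rw [hA]
  split_ifs with hg
  · rcases hg with hshort | hsmall
    · match hlist : t.toList with
      | [] => rw [pvStep_iter_nil, ← hlist]; simp
      | [a] => rw [pvStep_iter_singleton, ← hlist]; simp
      | a :: b :: r => rw [hlist] at hshort; simp at hshort
    · have : steps.toNat = 0 := by omega
      rw [this]
      simp
  · rw [pvFoldlConstIterate (pvBlevel rules), hlen]
    rw [pvBstitch_eq rules _ steps.toNat (pvInv_iter rules steps.toNat)]
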